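-- pv_equiv track=rewrite | github.com/Lin-0096/AI_Job_Agent | src/nodes/filter.py | _is_senior_role
-- ===== SOURCE A (Python) =====
-- def _is_senior_role(title: str) -> bool:
--     """Check if job title is a senior/lead position"""
--     excluded_keywords = [
--         "senior",
--         "lead",
--         "principal",
--         "architect",
--         "director",
--         "manager",
--         "head of",
--     ]
--
--     title_lower = title.lower()
--     for keyword in excluded_keywords:
--         if keyword in title_lower:
--             return True
--
--     return False
-- ===== SOURCE B (Python) =====
-- _KEYWORDS = (
--     "senior",
--     "lead",
--     "principal",
--     "architect",
--     "director",
--     "manager",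
--     "head of",
-- )
--
--
-- def _is_senior_role(title: str) -> bool:
--     """Check if job title is a senior/lead position"""
--     t = title.lower()
--     # single left-to-right pass over positions: does any keyword start here?
--     return any(t.startswith(_KEYWORDS, i) for i in range(len(t)))
-- ===== Notes on version B (the rewrite author's own statement) =====
-- stated objective: alternative
-- what changed: A loops over the 7 keywords doing a separate substring search for each; B makes one left-to-right pass over the title's positions and asks at each position whether any keyword starts there (str.startswith with a tuple).
import Mathlib
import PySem

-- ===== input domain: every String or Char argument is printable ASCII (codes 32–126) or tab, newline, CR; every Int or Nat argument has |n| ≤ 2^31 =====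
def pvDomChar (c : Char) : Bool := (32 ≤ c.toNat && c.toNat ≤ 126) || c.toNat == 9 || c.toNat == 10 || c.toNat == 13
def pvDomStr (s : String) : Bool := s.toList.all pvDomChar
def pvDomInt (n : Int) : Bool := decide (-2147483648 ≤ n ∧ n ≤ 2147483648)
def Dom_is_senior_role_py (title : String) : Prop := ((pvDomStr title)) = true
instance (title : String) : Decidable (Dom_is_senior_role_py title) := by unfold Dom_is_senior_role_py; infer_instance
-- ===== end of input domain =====

-- B replaces A's loop over the 7 keywords (one substring search each) by a single
-- left-to-right pass over the title's positions, testing at each position whether any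
-- keyword starts there (objective: alternative; same asymptotic cost).


-- ===== PORT A =====
-- A's keyword list, in source order
def aKeywords : List String :=
  ["senior", "lead", "principal", "architect", "director", "manager", "head of"]

-- A's for-loop with early return: walk the keyword list, return True on the first hit
def aLoop (tl : String) : List String → Bool
  | [] => false
  | k :: ks => if PySem.Str.isIn k tl then true else aLoop tl ks

def is_senior_role_py (title : String) : Bool :=
  aLoop (PySem.Str.lower title) aKeywords

-- ===== PORT B =====
-- B's keyword tuple, as char lists
def altKeywords : List (List Char) :=
  ["senior".toList, "lead".toList, "principal".toList, "architect".toList,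
   "director".toList, "manager".toList, "head of".toList]

-- B's single pass over positions: any(t.startswith(_KEYWORDS, i) for i in range(len(t)))
def altScan : List Char → Bool
  | [] => false
  | c :: rest => altKeywords.any (fun k => k.isPrefixOf (c :: rest)) || altScan rest

def is_senior_role_py_alt (title : String) : Bool :=
  altScan (PySem.Chars.lower title.toList)

-- ===== PRECONDITION & SPEC =====
def Spec_is_senior_role_py (title : String) (out : Bool) : Prop := out = is_senior_role_py_alt title
instance (title : String) (out : Bool) : Decidable (Spec_is_senior_role_py title out) := by unfold Spec_is_senior_role_py; infer_instance

-- ===== CLAIM (what is proved, stated in full; the proofs are below) =====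
def Claim_equal_is_senior_role_py : Prop := ∀ (title : String), Dom_is_senior_role_py title → Spec_is_senior_role_py title (is_senior_role_py title)

-- ===== LEMMAS AND PROOFS =====

-- A's early-return loop is just `any` over the keywords
theorem aLoop_eq_any (tl : String) (ks : List String) :
    aLoop tl ks = ks.any (fun k => PySem.Str.isIn k tl) := by
  induction ks with
  | nil => rfl
  | cons k ks ih => cases h : PySem.Str.isIn k tl <;> simp [aLoop, ih]

-- `sub in (c :: rest)` splits into "starts here" or "occurs in the rest"
theorem isIn_cons (k : List Char) (c : Char) (rest : List Char) :
    PySem.Chars.isIn k (c :: rest) = (k.isPrefixOf (c :: rest) || PySem.Chars.isIn k rest) := by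
  by_cases h : k <:+: (c :: rest)
  · rw [(PySem.Chars.isIn_iff_infix k (c :: rest)).2 h]
    rcases List.infix_cons_iff.1 h with hp | hi
    · simp [List.isPrefixOf_iff_prefix, hp]
    · simp [(PySem.Chars.isIn_iff_infix k rest).2 hi]
  · rw [(PySem.Chars.isIn_eq_false_iff k (c :: rest)).2 h]
    rw [List.infix_cons_iff] at h
    push Not at h
    rw [(PySem.Chars.isIn_eq_false_iff k rest).2 h.2]
    have hp : k.isPrefixOf (c :: rest) = false :=
      Bool.eq_false_iff.mpr (fun hh => h.1 (List.isPrefixOf_iff_prefix.mp hh))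
    simp [hp]

-- `any` distributes over `||`
theorem any_orb {α : Type} (l : List α) (f g : α → Bool) :
    l.any (fun x => f x || g x) = (l.any f || l.any g) := by
  induction l with
  | nil => rfl
  | cons a l ih => cases hf : f a <;> cases hg : g a <;> simp [hf, hg, ih]

-- B's position scan equals `any isIn` over the keywords
theorem altScan_eq_any (s : List Char) :
    altScan s = altKeywords.any (fun k => PySem.Chars.isIn k s) := by
  induction s with
  | nil => decide
  | cons c rest ih =>
    rw [altScan, ih]
    have : altKeywords.any (fun k => PySem.Chars.isIn k (c :: rest))
        = altKeywords.any (fun k => k.isPrefixOf (c :: rest) || PySem.Chars.isIn k rest) := by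
      simp only [isIn_cons]
    rw [this, any_orb]

-- ===== VERDICT (by name: the statement is the Claim_ definition above) =====
theorem is_senior_role_py_spec : Claim_equal_is_senior_role_py := by
  intro title _
  show is_senior_role_py title = is_senior_role_py_alt title
  rw [is_senior_role_py, is_senior_role_py_alt, aLoop_eq_any, altScan_eq_any]
  simp [aKeywords, altKeywords, PySem.Str.isIn_eq, PySem.Str.lower]
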